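-- pv_equiv track=rewrite | github.com/MrChengjn/pythonLicensePlateRecognition | main.py | __find_waves
-- ===== SOURCE A (Python) =====
-- def __find_waves(threshold, histogram):
--     up_point = -1  # 上升点
--     is_peak = False
--     if histogram[0] > threshold:
--         up_point = 0
--         is_peak = True
--     wave_peaks = []
--     for i, x in enumerate(histogram):
--         if is_peak and x < threshold:
--             if i - up_point > 2:
--                 is_peak = False
--                 wave_peaks.append((up_point, i))
--         elif not is_peak and x >= threshold:
--             is_peak = True
--             up_point = i
--     if is_peak and up_point != -1 and i - up_point > 4:
--         wave_peaks.append((up_point, i))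
--     return wave_peaks
-- ===== SOURCE B (Python) =====
-- def __find_waves(threshold, histogram):
--     n = len(histogram)
--     # stage 1: run-length encode the above/below-threshold shape
--     runs = []
--     i = 0
--     while i < n:
--         above = histogram[i] >= threshold
--         j = i + 1
--         while j < n and (histogram[j] >= threshold) == above:
--             j += 1
--         runs.append((above, i, j))
--         i = j
--     # stage 2: fold over the runs; the close index of a peak inside a
--     # below-threshold run [d, e) is max(d, s + 3), computed arithmetically
--     peaks = []
--     s = None
--     for above, d, e in runs:
--         if above:
--             if s is None:
--                 s = d
--         elif s is not None:
--             c = max(d, s + 3)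
--             if c < e:
--                 peaks.append((s, c))
--                 s = None
--     if s is not None and n - 1 - s > 4:
--         peaks.append((s, n - 1))
--     return peaks
-- ===== Notes on version B (the rewrite author's own statement) =====
-- stated objective: alternative
-- what changed: Replaced A's single-pass is_peak/up_point state machine by a two-stage algorithm: stage 1 run-length encodes the above/below-threshold shape of the histogram, stage 2 folds over the runs and computes each peak's close index arithmetically as max(d, s+3) instead of testing it element by element.
-- crash fix: On an empty histogram A raises IndexError (histogram[0]); B's staged scan naturally returns []. — e.g. on __find_waves(0, []): A raises IndexError, B returns []
import Mathlib
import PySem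

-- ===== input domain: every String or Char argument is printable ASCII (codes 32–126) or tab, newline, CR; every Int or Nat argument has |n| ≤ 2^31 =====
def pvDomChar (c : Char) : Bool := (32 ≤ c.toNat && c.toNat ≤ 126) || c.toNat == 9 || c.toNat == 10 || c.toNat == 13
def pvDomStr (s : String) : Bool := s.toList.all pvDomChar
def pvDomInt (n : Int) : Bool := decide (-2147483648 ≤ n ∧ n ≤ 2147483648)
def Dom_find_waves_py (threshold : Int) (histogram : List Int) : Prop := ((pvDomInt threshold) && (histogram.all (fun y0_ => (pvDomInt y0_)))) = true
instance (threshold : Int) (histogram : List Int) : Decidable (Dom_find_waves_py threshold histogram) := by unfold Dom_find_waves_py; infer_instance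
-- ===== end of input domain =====

-- B replaces A's one-pass is_peak/up_point state machine by a two-stage algorithm:
-- stage 1 run-length encodes the above/below-threshold shape, stage 2 folds over the
-- runs, computing each peak's close index arithmetically as max(d, s+3);
-- objective: alternative decomposition, same cost.

-- ===== PORT A =====
-- one step of A's for-loop over enumerate(histogram); state = (up_point, is_peak, wave_peaks)
def pvStepA (threshold : Int) (s : Int × Bool × List (Int × Int)) (ix : Int × Int) : Int × Bool × List (Int × Int) :=
  let up := s.1; let pk := s.2.1; let ws := s.2.2
  let i := ix.1; let x := ix.2
  if pk && decide (x < threshold) then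
    if i - up > 2 then (up, false, ws ++ [(up, i)]) else (up, pk, ws)
  else if (!pk) && decide (x ≥ threshold) then (i, true, ws)
  else (up, pk, ws)

def find_waves_py (threshold : Int) (histogram : List Int) : List (Int × Int) :=
  match PySem.List.pyGet? histogram 0 with
  | none => []   -- histogram[0] raises IndexError on [] ; excluded by Pre_
  | some h0 =>
    let up0 : Int := if h0 > threshold then 0 else -1
    let pk0 : Bool := decide (h0 > threshold)
    let r := (PySem.List.enumerate histogram 0).foldl (pvStepA threshold) (up0, pk0, [])
    let i : Int := (histogram.length : Int) - 1   -- leaked loop variable i (histogram nonempty here)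
    if r.2.1 && decide (r.1 ≠ -1) && decide (i - r.1 > 4) then r.2.2 ++ [(r.1, i)] else r.2.2

-- ===== PORT B =====
-- stage 1 inner while-loop: advance j while histogram[j] has the same above-ness
-- (fuel = remaining indices; the loop runs at most h.length - j times, so the fuel is exact)
def pvRunEnd (threshold : Int) (h : List Int) (ab : Bool) : Nat → Nat → Nat
  | 0, j => j
  | fuel + 1, j =>
    if hj : j < h.length then
      if decide (h[j] ≥ threshold) == ab then pvRunEnd threshold h ab fuel (j + 1) else j
    else j

-- stage 1 outer while-loop: the list of runs (above, start, end) from index i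
def pvRuns (threshold : Int) (h : List Int) : Nat → Nat → List (Bool × Nat × Nat)
  | 0, _ => []
  | fuel + 1, i =>
    if hi : i < h.length then
      let ab := decide (h[i] ≥ threshold)
      let j := pvRunEnd threshold h ab (h.length - (i + 1)) (i + 1)
      (ab, i, j) :: pvRuns threshold h fuel j
    else []

-- stage 2 body: process one run
def pvRunStep (s : Option Int × List (Int × Int)) (r : Bool × Nat × Nat) : Option Int × List (Int × Int) :=
  if r.1 then
    match s.1 with
    | none => (some (r.2.1 : Int), s.2)
    | some _ => s
  else
    match s.1 with
    | none => s
    | some u =>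
      let c := max (r.2.1 : Int) (u + 3)
      if c < (r.2.2 : Int) then (none, s.2 ++ [(u, c)]) else s

def find_waves_py_alt (threshold : Int) (histogram : List Int) : List (Int × Int) :=
  match (pvRuns threshold histogram histogram.length 0).foldl pvRunStep (none, []) with
  | (some s, peaks) =>
    if (histogram.length : Int) - 1 - s > 4 then peaks ++ [(s, (histogram.length : Int) - 1)] else peaks
  | (none, peaks) => peaks

-- ===== PRECONDITION & SPEC =====
-- A evaluates histogram[0] first, so it raises IndexError on the empty list; Pre_ excludes exactly that.
def Pre_find_waves_py (threshold : Int) (histogram : List Int) : Prop := histogram ≠ []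
instance (threshold : Int) (histogram : List Int) : Decidable (Pre_find_waves_py threshold histogram) := by unfold Pre_find_waves_py; infer_instance
def pvWitness_find_waves_py : Int × List Int := (1, [2, 2, 2, 0, 0, 0, 5])

-- A raises IndexError exactly on the empty histogram; B's staged scan naturally returns [] there.
def Raises_find_waves_py (threshold : Int) (histogram : List Int) : Prop := histogram = []
instance (threshold : Int) (histogram : List Int) : Decidable (Raises_find_waves_py threshold histogram) := by unfold Raises_find_waves_py; infer_instance
def pvRaiseWitness_find_waves_py : Int × List Int := (0, [])
def pvRaiseWitnessOut_find_waves_py : List (Int × Int) := []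

def Spec_find_waves_py (threshold : Int) (histogram : List Int) (out : List (Int × Int)) : Prop := out = find_waves_py_alt threshold histogram
instance (threshold : Int) (histogram : List Int) (out : List (Int × Int)) : Decidable (Spec_find_waves_py threshold histogram out) := by unfold Spec_find_waves_py; infer_instance

-- ===== CLAIM (what is proved, stated in full; the proofs are below) =====
def Claim_equal_find_waves_py : Prop := ∀ (threshold : Int) (histogram : List Int), Dom_find_waves_py threshold histogram → Pre_find_waves_py threshold histogram → Spec_find_waves_py threshold histogram (find_waves_py threshold histogram)
def Claim_raises_find_waves_py : Prop := (∀ (threshold : Int) (histogram : List Int), Dom_find_waves_py threshold histogram → Raises_find_waves_py threshold histogram → ¬ Pre_find_waves_py threshold histogram) ∧ (Dom_find_waves_py (pvRaiseWitness_find_waves_py.1) (pvRaiseWitness_find_waves_py.2) ∧ Raises_find_waves_py (pvRaiseWitness_find_waves_py.1) (pvRaiseWitness_find_waves_py.2) ∧ find_waves_py_alt (pvRaiseWitness_find_waves_py.1) (pvRaiseWitness_find_waves_py.2) = pvRaiseWitnessOut_find_waves_py)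

-- ===== LEMMAS AND PROOFS =====

-- element-wise reference recursion shared by both sides (A's loop body, state-passing form)
def pvScan (threshold : Int) : List Int → Int → (Option Int × List (Int × Int)) → Option Int × List (Int × Int)
  | [], _, s => s
  | x :: t, i, s =>
    pvScan threshold t (i + 1)
      (match s.1 with
       | none => if x < threshold then s else (some i, s.2)
       | some u => if x < threshold ∧ i - u > 2 then (none, s.2 ++ [(u, i)]) else s)

-- finalization with n = total length
def pvFinB (n : Int) (s : Option Int × List (Int × Int)) : List (Int × Int) :=
  match s.1 with
  | some u => if n - 1 - u > 4 then s.2 ++ [(u, n - 1)] else s.2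
  | none => s.2

-- reference recursion with finalization built in (used by the A-side proof)
def pvSpecR (threshold : Int) : List Int → Int → Option Int → List (Int × Int) → List (Int × Int)
  | [], _, none, acc => acc
  | [], i, some s, acc => if i - 1 - s > 4 then acc ++ [(s, i - 1)] else acc
  | x :: t, i, none, acc =>
      if x < threshold then pvSpecR threshold t (i + 1) none acc
      else pvSpecR threshold t (i + 1) (some i) acc
  | x :: t, i, some s, acc =>
      if x < threshold ∧ i - s > 2 then pvSpecR threshold t (i + 1) none (acc ++ [(s, i)])
      else pvSpecR threshold t (i + 1) (some s) acc

lemma pvSpecR_eq_scan (threshold : Int) : ∀ (t : List Int) (i : Int) (st : Option Int) (acc : List (Int × Int)),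
    pvSpecR threshold t i st acc = pvFinB (i + t.length) (pvScan threshold t i (st, acc)) := by
  intro t
  induction t with
  | nil =>
    intro i st acc
    cases st <;> simp [pvSpecR, pvScan, pvFinB]
  | cons x t ih =>
    intro i st acc
    have hlen : i + ((x :: t).length : Int) = (i + 1) + (t.length : Int) := by simp; ring
    cases st with
    | none =>
      by_cases hx : x < threshold
      · simp only [pvSpecR, pvScan, if_pos hx, ih, hlen]
      · simp only [pvSpecR, pvScan, if_neg hx, ih, hlen]
    | some u =>
      by_cases hc : x < threshold ∧ i - u > 2
      · simp only [pvSpecR, pvScan, if_pos hc, ih, hlen]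
      · simp only [pvSpecR, pvScan, if_neg hc, ih, hlen]

-- A's after-loop finalization, with n = the leaked last index
def pvFinA (n : Int) (s : Int × Bool × List (Int × Int)) : List (Int × Int) :=
  if s.2.1 && decide (s.1 ≠ -1) && decide (n - s.1 > 4) then s.2.2 ++ [(s.1, n)] else s.2.2

lemma pvA_eq_specR (threshold : Int) : ∀ (t : List Int) (i up : Int) (pk : Bool) (ws : List (Int × Int)),
    (pk = true → 0 ≤ up) → 0 ≤ i →
    pvFinA (i + t.length - 1) ((PySem.List.enumerate t i).foldl (pvStepA threshold) (up, pk, ws))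
    = pvSpecR threshold t i (if pk then some up else none) ws := by
  intro t
  induction t with
  | nil =>
    intro i up pk ws hinv _
    cases pk with
    | false => simp [PySem.List.enumerate, pvSpecR, pvFinA]
    | true =>
      have h0 : 0 ≤ up := hinv rfl
      have hne : up ≠ -1 := by omega
      by_cases hgt : i - 1 - up > 4
      · simp [PySem.List.enumerate, pvSpecR, pvFinA, hne, hgt]
      · simp [PySem.List.enumerate, pvSpecR, pvFinA, hne, show ¬ (4:Int) < i - 1 - up from hgt]
  | cons x t ih =>
    intro i up pk ws hinv hi
    rw [PySem.List.enumerate_cons, List.foldl_cons]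
    have hlen : i + ((x :: t).length : Int) - 1 = (i + 1) + (t.length : Int) - 1 := by
      simp; ring
    rw [hlen]
    cases pk with
    | true =>
      have h0 : 0 ≤ up := hinv rfl
      by_cases hx : x < threshold
      · by_cases hiu : i - up > 2
        · rw [show pvStepA threshold (up, true, ws) (i, x) = (up, false, ws ++ [(up, i)]) from by
            simp [pvStepA, hx, hiu]]
          rw [ih (i + 1) up false (ws ++ [(up, i)]) (by simp) (by omega)]
          simp [pvSpecR, hx, hiu]
        · rw [show pvStepA threshold (up, true, ws) (i, x) = (up, true, ws) from by
            simp [pvStepA, hx, hiu]]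
          rw [ih (i + 1) up true ws (fun _ => h0) (by omega)]
          simp [pvSpecR, hx, hiu]
      · rw [show pvStepA threshold (up, true, ws) (i, x) = (up, true, ws) from by
          simp [pvStepA, hx]]
        rw [ih (i + 1) up true ws (fun _ => h0) (by omega)]
        simp [pvSpecR, hx]
    | false =>
      by_cases hx : x < threshold
      · rw [show pvStepA threshold (up, false, ws) (i, x) = (up, false, ws) from by
          simp [pvStepA, hx]]
        rw [ih (i + 1) up false ws (by simp) (by omega)]
        simp [pvSpecR, hx]
      · rw [show pvStepA threshold (up, false, ws) (i, x) = (i, true, ws) from by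
          simp [pvStepA, hx]]
        rw [ih (i + 1) i true ws (fun _ => hi) (by omega)]
        simp [pvSpecR, hx]

-- ---- B side: from runs back to the element-wise scan ----

lemma pvScan_append (threshold : Int) : ∀ (a b : List Int) (i : Int) (s : Option Int × List (Int × Int)),
    pvScan threshold (a ++ b) i s = pvScan threshold b (i + a.length) (pvScan threshold a i s) := by
  intro a
  induction a with
  | nil => intro b i s; simp [pvScan]
  | cons x a ih =>
    intro b i s
    have : i + ((x :: a).length : Int) = (i + 1) + (a.length : Int) := by simp; ring
    simp only [List.cons_append, pvScan, ih, this]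

lemma pvScan_above_open (threshold : Int) : ∀ (seg : List Int) (i u : Int) (acc : List (Int × Int)),
    (∀ x ∈ seg, threshold ≤ x) →
    pvScan threshold seg i (some u, acc) = (some u, acc) := by
  intro seg
  induction seg with
  | nil => intro i u acc _; rfl
  | cons x seg ih =>
    intro i u acc hall
    have hx : threshold ≤ x := hall x (by simp)
    have hnx : ¬ (x < threshold ∧ i - u > 2) := by rintro ⟨a, _⟩; omega
    simp only [pvScan, if_neg hnx]
    exact ih (i + 1) u acc (fun y hy => hall y (by simp [hy]))

lemma pvScan_below_none (threshold : Int) : ∀ (seg : List Int) (i : Int) (acc : List (Int × Int)),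
    (∀ x ∈ seg, x < threshold) →
    pvScan threshold seg i (none, acc) = (none, acc) := by
  intro seg
  induction seg with
  | nil => intro i acc _; rfl
  | cons x seg ih =>
    intro i acc hall
    have hx : x < threshold := hall x (by simp)
    simp only [pvScan, if_pos hx]
    exact ih (i + 1) acc (fun y hy => hall y (by simp [hy]))

lemma pvScan_below_open (threshold : Int) : ∀ (seg : List Int) (i u : Int) (acc : List (Int × Int)),
    (∀ x ∈ seg, x < threshold) →
    pvScan threshold seg i (some u, acc)
      = if max i (u + 3) < i + seg.length then (none, acc ++ [(u, max i (u + 3))]) else (some u, acc) := by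
  intro seg
  induction seg with
  | nil =>
    intro i u acc _
    simp [pvScan]
  | cons x seg ih =>
    intro i u acc hall
    have hx : x < threshold := hall x (by simp)
    by_cases hiu : i - u > 2
    · have hc : x < threshold ∧ i - u > 2 := ⟨hx, hiu⟩
      simp only [pvScan, if_pos hc]
      rw [pvScan_below_none threshold seg (i + 1) _ (fun y hy => hall y (by simp [hy]))]
      have h1 : max i (u + 3) = i := by omega
      have h2 : max i (u + 3) < i + ((x :: seg).length : Int) := by rw [h1]; simp
      rw [if_pos h2, h1]
    · have hc : ¬ (x < threshold ∧ i - u > 2) := by rintro ⟨_, a⟩; omega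
      simp only [pvScan, if_neg hc]
      rw [ih (i + 1) u acc (fun y hy => hall y (by simp [hy]))]
      have h1 : max (i + 1) (u + 3) = max i (u + 3) := by omega
      have h2 : (i + 1) + (seg.length : Int) = i + ((x :: seg).length : Int) := by simp; ring
      rw [h1, h2]

-- every index in [j0, pvRunEnd fuel j0) has the run's above-ness
lemma pvRunEnd_prop (threshold : Int) (h : List Int) (ab : Bool) :
    ∀ (fuel j0 m : Nat), j0 ≤ m → m < pvRunEnd threshold h ab fuel j0 →
    ∃ hm : m < h.length, decide (h[m] ≥ threshold) = ab := by
  intro fuel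
  induction fuel with
  | zero => intro j0 m h1 h2; simp [pvRunEnd] at h2; omega
  | succ fuel ih =>
    intro j0 m h1 h2
    by_cases hj : j0 < h.length
    · by_cases hb : decide (h[j0] ≥ threshold) == ab
      · rw [pvRunEnd, dif_pos hj, if_pos hb] at h2
        by_cases he : m = j0
        · subst he; exact ⟨hj, by simpa using hb⟩
        · exact ih (j0 + 1) m (by omega) h2
      · rw [pvRunEnd, dif_pos hj, if_neg hb] at h2; omega
    · rw [pvRunEnd, dif_neg hj] at h2; omega

lemma pvRunEnd_ge (threshold : Int) (h : List Int) (ab : Bool) :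
    ∀ (fuel j0 : Nat), j0 ≤ pvRunEnd threshold h ab fuel j0 := by
  intro fuel
  induction fuel with
  | zero => intro j0; simp [pvRunEnd]
  | succ fuel ih =>
    intro j0
    rw [pvRunEnd]
    split
    · split
      · have := ih (j0 + 1); omega
      · omega
    · omega

lemma pvRunEnd_le (threshold : Int) (h : List Int) (ab : Bool) :
    ∀ (fuel j0 : Nat), j0 ≤ h.length → pvRunEnd threshold h ab fuel j0 ≤ h.length := by
  intro fuel
  induction fuel with
  | zero => intro j0 hle; simpa [pvRunEnd]
  | succ fuel ih =>
    intro j0 hle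
    rw [pvRunEnd]
    split
    · split
      · exact ih (j0 + 1) (by omega)
      · omega
    · omega

-- membership in the run segment gives an index with the run's above-ness
lemma pvSeg_mem {h : List Int} {i j : Nat} (hj : j ≤ h.length) {x : Int}
    (hx : x ∈ (h.drop i).take (j - i)) :
    ∃ m, i ≤ m ∧ m < j ∧ ∃ hm : m < h.length, h[m] = x := by
  obtain ⟨p, hp, he⟩ := List.mem_iff_getElem.mp hx
  have hlen : ((h.drop i).take (j - i)).length = min (j - i) (h.length - i) := by simp
  rw [hlen] at hp
  have hm : i + p < h.length := by omega
  refine ⟨i + p, by omega, by omega, hm, ?_⟩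
  rw [List.getElem_take, List.getElem_drop] at he
  exact he

-- one run processed by pvRunStep equals the element-wise scan of its segment
lemma pvRun_seg (threshold : Int) (h : List Int) (i j : Nat) (ab : Bool)
    (hij : i < j) (hj : j ≤ h.length)
    (hall : ∀ m, i ≤ m → m < j → ∃ hm : m < h.length, decide (h[m] ≥ threshold) = ab)
    (s : Option Int × List (Int × Int)) :
    pvScan threshold ((h.drop i).take (j - i)) (i : Int) s = pvRunStep s (ab, i, j) := by
  obtain ⟨st, acc⟩ := s
  cases hab : ab with
  | true =>
    have habove : ∀ x ∈ (h.drop i).take (j - i), threshold ≤ x := by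
      intro x hx
      obtain ⟨m, hm1, hm2, hm, he⟩ := pvSeg_mem hj hx
      obtain ⟨_, hd⟩ := hall m hm1 hm2
      rw [hab] at hd
      have := of_decide_eq_true hd
      omega
    cases st with
    | some u =>
      rw [pvScan_above_open threshold _ _ _ _ habove]
      simp [pvRunStep]
    | none =>
      have hdrop : h.drop i = h[i]'(by omega) :: h.drop (i + 1) := (List.getElem_cons_drop (by omega)).symm
      have htake : (h.drop i).take (j - i) = h[i]'(by omega) :: (h.drop (i + 1)).take (j - (i + 1)) := by
        rw [hdrop, show j - i = (j - (i + 1)) + 1 from by omega, List.take_succ_cons]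
      have hxi : threshold ≤ h[i]'(by omega) := by
        apply habove; rw [htake]; simp
      rw [htake]
      simp only [pvScan, if_neg (show ¬ h[i]'(by omega) < threshold from by omega)]
      rw [pvScan_above_open threshold _ _ _ _ (by
        intro x hx; apply habove; rw [htake]; simp [hx])]
      simp [pvRunStep]
  | false =>
    have hbelow : ∀ x ∈ (h.drop i).take (j - i), x < threshold := by
      intro x hx
      obtain ⟨m, hm1, hm2, hm, he⟩ := pvSeg_mem hj hx
      obtain ⟨_, hd⟩ := hall m hm1 hm2
      rw [hab] at hd
      have := of_decide_eq_false hd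
      omega
    cases st with
    | none =>
      rw [pvScan_below_none threshold _ _ _ hbelow]
      simp [pvRunStep]
    | some u =>
      rw [pvScan_below_open threshold _ _ _ _ hbelow]
      have hlen : (((h.drop i).take (j - i)).length : Int) = (j : Int) - (i : Int) := by
        simp; omega
      rw [hlen]
      simp only [pvRunStep, Bool.false_eq_true, if_false]
      have : (i : Int) + ((j : Int) - (i : Int)) = (j : Int) := by ring
      rw [this]

lemma pvRuns_scan (threshold : Int) (h : List Int) : ∀ (fuel i : Nat), h.length - i ≤ fuel → i ≤ h.length →
    ∀ (s : Option Int × List (Int × Int)),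
    List.foldl pvRunStep s (pvRuns threshold h fuel i) = pvScan threshold (h.drop i) (i : Int) s := by
  intro fuel
  induction fuel with
  | zero =>
    intro i hf hle s
    have hi : i = h.length := by omega
    subst hi
    simp [pvRuns, pvScan, List.drop_length]
  | succ fuel ih =>
    intro i hf hle s
    by_cases hi : i < h.length
    · rw [pvRuns]
      simp only [dif_pos hi]
      set ab := decide (h[i] ≥ threshold) with hab
      set j := pvRunEnd threshold h ab (h.length - (i + 1)) (i + 1) with hjdef
      have hge : i + 1 ≤ j := pvRunEnd_ge threshold h ab (h.length - (i + 1)) (i + 1)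
      have hjle : j ≤ h.length := pvRunEnd_le threshold h ab (h.length - (i + 1)) (i + 1) (by omega)
      rw [List.foldl_cons]
      rw [ih j (by omega) hjle]
      have hsplit : h.drop i = (h.drop i).take (j - i) ++ h.drop j := by
        conv_lhs => rw [← List.take_append_drop (j - i) (h.drop i)]
        rw [List.drop_drop, show i + (j - i) = j from by omega]
      rw [hsplit, pvScan_append]
      have hall : ∀ m, i ≤ m → m < j → ∃ hm : m < h.length, decide (h[m] ≥ threshold) = ab := by
        intro m hm1 hm2
        by_cases he : m = i
        · subst he; exact ⟨hi, hab.symm⟩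
        · exact pvRunEnd_prop threshold h ab (h.length - (i + 1)) (i + 1) m (by omega) hm2
      rw [pvRun_seg threshold h i j ab (by omega) hjle hall s]
      congr 1
      have : (((h.drop i).take (j - i)).length : Int) = (j : Int) - (i : Int) := by simp; omega
      rw [this]; ring
    · have hie : i = h.length := by omega
      subst hie
      simp [pvRuns, pvScan, List.drop_length]

lemma pvAlt_eq_specR (threshold : Int) (h : List Int) :
    find_waves_py_alt threshold h = pvSpecR threshold h 0 none [] := by
  unfold find_waves_py_alt
  rw [pvSpecR_eq_scan]
  have hs := pvRuns_scan threshold h h.length 0 (by omega) (by omega) (none, [])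
  simp only [List.drop_zero, Nat.cast_zero] at hs
  rw [hs]
  simp only [zero_add]
  rcases pvScan threshold h 0 (none, []) with ⟨st, ps⟩
  cases st <;> simp [pvFinB]

-- ===== VERDICT (by name: the statement is the Claim_ definition above) =====
theorem find_waves_py_spec : Claim_equal_find_waves_py := by
  intro threshold histogram _ hpre
  unfold Spec_find_waves_py
  cases histogram with
  | nil => exact absurd rfl hpre
  | cons h0 t =>
    rw [pvAlt_eq_specR]
    unfold find_waves_py
    rw [PySem.List.pyGet?_zero_cons]
    have hA := pvA_eq_specR threshold (h0 :: t) 0 (if h0 > threshold then 0 else -1)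
      (decide (h0 > threshold)) [] (by intro hd; simp at hd; simp [hd]) (by omega)
    simp only [zero_add] at hA
    show pvFinA ((((h0 :: t).length : Nat) : Int) - 1) _ = _
    rw [hA]
    by_cases hgt : h0 > threshold
    · have hnx : ¬ h0 < threshold := by omega
      simp only [decide_eq_true_eq, if_pos hgt]
      conv_lhs => rw [pvSpecR]
      conv_rhs => rw [pvSpecR]
      rw [if_neg (by rintro ⟨a, b⟩; omega : ¬ (h0 < threshold ∧ (0 : Int) - 0 > 2)), if_neg hnx]
    · simp only [decide_eq_true_eq, if_neg hgt]

@[simp] theorem find_waves_py_raises : Claim_raises_find_waves_py := by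
  unfold Claim_raises_find_waves_py
  refine ⟨fun _ _ _ hr hp => hp hr, by decide, rfl, by decide⟩
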